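-- pv_equiv track=rewrite | github.com/mcxwx123/RecGFI | data/data_preprocess_2.py | count_positive_words
-- ===== SOURCE A (Python) =====
-- def count_positive_words(str):
--     lst=['enabled', 'vs', 'open', 'actual', 'setting', 'first', 'json', 'form', 'editor', 'default', 'show', 'node', 'vscode', 'comic']
--     count=0
--     str=str.lower()
--     lst_word=str.split()
--     for i in lst_word:
--         if i in lst:
--             count+=1
--
--     return count
-- ===== SOURCE B (Python) =====
-- KEYWORDS = "enabled vs open actual setting first json form editor default show node vscode comic".split()
--
-- def count_positive_words(str):
--     words = str.lower().split()
--     total = 0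
--     for kw in KEYWORDS:
--         total += words.count(kw)
--     return total
-- ===== Notes on version B (the rewrite author's own statement) =====
-- stated objective: alternative
-- what changed: B inverts the traversal: instead of scanning the words once with a per-word membership test of the keyword list, it loops over the 14 fixed keywords (derived by splitting one literal) and accumulates each keyword's occurrence count in the word list.
import Mathlib
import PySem

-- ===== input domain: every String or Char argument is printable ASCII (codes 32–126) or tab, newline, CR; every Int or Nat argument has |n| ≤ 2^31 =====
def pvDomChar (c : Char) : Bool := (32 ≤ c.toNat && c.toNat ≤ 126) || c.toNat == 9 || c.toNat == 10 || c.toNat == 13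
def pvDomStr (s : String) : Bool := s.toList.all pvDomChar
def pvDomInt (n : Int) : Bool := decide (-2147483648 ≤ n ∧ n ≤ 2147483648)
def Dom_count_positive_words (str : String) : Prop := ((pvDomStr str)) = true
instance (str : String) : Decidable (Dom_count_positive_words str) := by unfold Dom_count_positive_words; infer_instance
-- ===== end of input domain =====

-- B loops over the 14 fixed keywords (split from one literal) summing each one's count in the word list, instead of scanning the words with a membership test (alternative decomposition, same cost).


-- ===== PORT A =====
def count_positive_words (str : String) : Int :=
  let lst : List String := ["enabled", "vs", "open", "actual", "setting", "first", "json", "form", "editor", "default", "show", "node", "vscode", "comic"]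
  let count : Int := 0
  let str := PySem.Str.lower str
  let lst_word := PySem.Str.split₀ str
  lst_word.foldl (fun count i => if lst.contains i then count + 1 else count) count

-- ===== PORT B =====
def pvKeywords : List String :=
  PySem.Str.split₀ "enabled vs open actual setting first json form editor default show node vscode comic"

def count_positive_words_alt (str : String) : Int :=
  let words := PySem.Str.split₀ (PySem.Str.lower str)
  pvKeywords.foldl (fun total kw => total + (words.count kw : Int)) 0

-- ===== PRECONDITION & SPEC =====
def Spec_count_positive_words (str : String) (out : Int) : Prop := out = count_positive_words_alt str
instance (str : String) (out : Int) : Decidable (Spec_count_positive_words str out) := by unfold Spec_count_positive_words; infer_instance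

-- ===== CLAIM (what is proved, stated in full; the proofs are below) =====
def Claim_equal_count_positive_words : Prop := ∀ (str : String), Dom_count_positive_words str → Spec_count_positive_words str (count_positive_words str)

-- ===== LEMMAS AND PROOFS =====

lemma sum_ite_one (lst : List String) (h : lst.Nodup) (w : String) :
    (lst.map fun kw => if w == kw then (1 : Int) else 0).sum = if lst.contains w then 1 else 0 := by
  induction lst with
  | nil => simp
  | cons k rest ihl =>
    simp only [List.map_cons, List.sum_cons, List.contains_cons]
    have hk : k ∉ rest := (List.nodup_cons.mp h).1
    rw [ihl (List.nodup_cons.mp h).2]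
    by_cases hw : w = k
    · subst hw
      simp [List.contains_eq_mem, hk]
    · simp [hw, beq_iff_eq]

-- Σ_{kw ∈ lst} words.count kw = words.countP (· ∈ lst), for a duplicate-free keyword list.
lemma sum_count_eq_countP (lst : List String) (h : lst.Nodup) (words : List String) :
    (lst.map (fun kw => (words.count kw : Int))).sum = (words.countP (fun w => lst.contains w) : Int) := by
  induction words with
  | nil => simp
  | cons w ws ih =>
    rw [List.countP_cons]
    simp only [List.count_cons]
    push_cast
    rw [List.sum_map_add]
    rw [ih]
    rw [sum_ite_one lst h w]

theorem count_positive_words_spec : Claim_equal_count_positive_words := by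
  intro s _
  unfold Spec_count_positive_words count_positive_words count_positive_words_alt
  have hkw : pvKeywords = ["enabled", "vs", "open", "actual", "setting", "first", "json", "form", "editor", "default", "show", "node", "vscode", "comic"] := by decide
  simp only [PySem.List.foldl_if_add_one, hkw, PySem.List.foldl_add]
  rw [sum_count_eq_countP _ (by decide)]
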